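-- pv_equiv track=rewrite | github.com/DesertFearful/AoC24 | day17/day17.py | check
-- ===== SOURCE A (Python) =====
-- def check(instr, a):
--     b, c = 0, 0
--     p = 0
--     while a != 0 and p < len(instr):
--         c = a >> ((a & 7) ^ 7)
--         b = (a & 7) ^ c
--         a = a >> 3
--         if instr[p] != (b & 7):
--             return False
--         p += 1
--     return a == 0 and p == len(instr)
-- ===== SOURCE B (Python) =====
-- def check(instr, a):
--     # B: generate the full output sequence first (capped at len(instr) emissions),
--     # then compare it to instr in one equality; A compares inline with early exit.
--     def run(a, fuel):
--         if a == 0 or fuel == 0: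
--             return [], a
--         c = a >> ((a & 7) ^ 7)
--         b = (a & 7) ^ c
--         rest, fa = run(a >> 3, fuel - 1)
--         return [b & 7] + rest, fa
--
--     out, fa = run(a, len(instr))
--     return fa == 0 and out == list(instr)
-- ===== Notes on version B (the rewrite author's own statement) =====
-- stated objective: alternative
-- what changed: B separates the VM into two phases: a recursive generator that produces the whole (length-capped) output list, then a single list-equality check, instead of A's single while loop that compares each emitted digit to instr[p] inline with an early return.
import Mathlib
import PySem

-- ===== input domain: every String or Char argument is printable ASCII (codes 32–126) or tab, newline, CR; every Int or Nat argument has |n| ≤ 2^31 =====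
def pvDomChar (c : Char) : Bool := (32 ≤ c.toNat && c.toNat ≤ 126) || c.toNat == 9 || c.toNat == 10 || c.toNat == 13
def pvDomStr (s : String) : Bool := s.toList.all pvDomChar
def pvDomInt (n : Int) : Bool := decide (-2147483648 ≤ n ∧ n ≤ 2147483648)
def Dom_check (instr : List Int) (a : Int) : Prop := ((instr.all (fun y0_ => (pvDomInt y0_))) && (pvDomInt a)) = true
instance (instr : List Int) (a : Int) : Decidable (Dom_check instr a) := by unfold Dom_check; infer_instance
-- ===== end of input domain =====

-- B replaces A's inline compare-and-early-exit loop by a two-phase decomposition: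
-- generate the capped output list recursively, then compare it to instr once (alternative, same cost).


-- ===== PORT A =====
-- A's while loop: p advances through instr each iteration, so the loop is the
-- structural recursion on the remaining suffix of instr (rest = instr[p:]).
-- Python's &, ^, >> on ints are PySem.Int.band / bxor and Lean's >>> (shift amount
-- (a&7)^7 is always in 0..7, so .toNat is exact).
def checkGo (rest : List Int) (a : Int) : Bool :=
  match rest with
  | [] => decide (a = 0)                 -- loop exits with p = len(instr): return a == 0 and True
  | x :: rest' =>
      if a = 0 then false                -- loop exits with p < len(instr): return a == 0 and False
      else
        let c : Int := a >>> (PySem.Int.bxor (PySem.Int.band a 7) 7).toNat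
        let b : Int := PySem.Int.bxor (PySem.Int.band a 7) c
        let a' : Int := a >>> (3 : Nat)
        if x ≠ PySem.Int.band b 7 then false
        else checkGo rest' a'

def check (instr : List Int) (a : Int) : Bool := checkGo instr a

-- ===== PORT B =====
-- B's recursive generator: returns (emitted outputs, final a), capped by fuel.
def checkRun (a : Int) (fuel : Nat) : List Int × Int :=
  match fuel with
  | 0 => ([], a)
  | fuel' + 1 =>
      if a = 0 then ([], a)
      else
        let c : Int := a >>> (PySem.Int.bxor (PySem.Int.band a 7) 7).toNat
        let b : Int := PySem.Int.bxor (PySem.Int.band a 7) c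
        let r := checkRun (a >>> (3 : Nat)) fuel'
        (PySem.Int.band b 7 :: r.1, r.2)

def check_alt (instr : List Int) (a : Int) : Bool :=
  let r := checkRun a instr.length
  decide (r.2 = 0) && decide (r.1 = instr)

-- ===== PRECONDITION & SPEC =====
def Spec_check (instr : List Int) (a : Int) (out : Bool) : Prop := out = check_alt instr a
instance (instr : List Int) (a : Int) (out : Bool) : Decidable (Spec_check instr a out) := by unfold Spec_check; infer_instance

-- ===== CLAIM (what is proved, stated in full; the proofs are below) =====
def Claim_equal_check : Prop := ∀ (instr : List Int) (a : Int), Dom_check instr a → Spec_check instr a (check instr a)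

-- ===== LEMMAS AND PROOFS =====
theorem checkGo_eq_run (rest : List Int) (a : Int) :
    checkGo rest a
      = (decide ((checkRun a rest.length).2 = 0) && decide ((checkRun a rest.length).1 = rest)) := by
  induction rest generalizing a with
  | nil => simp [checkGo, checkRun]
  | cons x rest' ih =>
      by_cases ha : a = 0
      · subst ha; simp [checkGo, checkRun]
      · simp only [checkGo, checkRun, List.length_cons, if_neg ha]
        by_cases hx : x = PySem.Int.band (PySem.Int.bxor (PySem.Int.band a 7)
            (a >>> (PySem.Int.bxor (PySem.Int.band a 7) 7).toNat)) 7
        · simp [hx, ih]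
        · simp [hx]
          exact fun _ h => absurd h.symm hx

-- ===== VERDICT (by name: the statement is the Claim_ definition above) =====
theorem check_spec : Claim_equal_check := by
  intro instr a _
  unfold Spec_check check check_alt
  simpa using checkGo_eq_run instr a
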